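-- pv_equiv track=rewrite | github.com/JunhaoLiXD/COP4533-Longest-Common-Sequence | hvlcs.py | compute_dp
-- ===== SOURCE A (Python) =====
-- def compute_dp(A, B, value):
--     """
--     Compute the dynamic programming table for the HVLCS problem.
--
--     Args:
--         A (str): The first input string.
--         B (str): The second input string.
--         value (dict[str, int]): Mapping from characters to their values.
--
--     Returns:
--         list[list[int]]: A 2D DP table where dp[i][j] is the maximum value of a common subsequence of A[:i] and B[:j].
--     """
--     n, m = len(A), len(B)
--
--     # dp[i][j] = maximum value of a common subsequence of A[:i] and B[:j]
--     dp = [[0] * (m + 1) for _ in range(n + 1)]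
--
--     for i in range(1, n + 1):
--         for j in range(1, m + 1):
--             if A[i - 1] == B[j - 1]:
--                 # Case 1: The current characters match, either take the match or skip one character from A or B
--                 dp[i][j] = max(
--                     dp[i - 1][j],
--                     dp[i][j - 1],
--                     dp[i - 1][j - 1] + value[A[i - 1]]
--                 )
--             else:
--                 # Case 2: If they do not match, skip one character from either A or B
--                 dp[i][j] = max(dp[i - 1][j], dp[i][j - 1])
--
--     return dp
-- ===== SOURCE B (Python) =====
-- def compute_dp(A, B, value):
--     """Top-down memoized recursion: lcs(i, j) computes one cell on demand from
--     its subproblems, caching results in a dict; the table is then assembled by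
--     querying every (i, j)."""
--     n, m = len(A), len(B)
--     memo = {}
--
--     def lcs(i, j):
--         if (i, j) in memo:
--             return memo[(i, j)]
--         if i == 0 or j == 0:
--             r = 0
--         else:
--             r = max(lcs(i - 1, j), lcs(i, j - 1))
--             if A[i - 1] == B[j - 1]:
--                 r = max(r, lcs(i - 1, j - 1) + value[A[i - 1]])
--         memo[(i, j)] = r
--         return r
--
--     return [[lcs(i, j) for j in range(m + 1)] for i in range(n + 1)]
-- ===== Notes on version B (the rewrite author's own statement) =====
-- stated objective: alternative
-- what changed: A fills a preallocated 2D table bottom-up with nested index loops; B computes each cell by top-down memoized recursion lcs(i,j) over subproblems cached in a dict, and assembles the table by querying every cell.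
import Mathlib
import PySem

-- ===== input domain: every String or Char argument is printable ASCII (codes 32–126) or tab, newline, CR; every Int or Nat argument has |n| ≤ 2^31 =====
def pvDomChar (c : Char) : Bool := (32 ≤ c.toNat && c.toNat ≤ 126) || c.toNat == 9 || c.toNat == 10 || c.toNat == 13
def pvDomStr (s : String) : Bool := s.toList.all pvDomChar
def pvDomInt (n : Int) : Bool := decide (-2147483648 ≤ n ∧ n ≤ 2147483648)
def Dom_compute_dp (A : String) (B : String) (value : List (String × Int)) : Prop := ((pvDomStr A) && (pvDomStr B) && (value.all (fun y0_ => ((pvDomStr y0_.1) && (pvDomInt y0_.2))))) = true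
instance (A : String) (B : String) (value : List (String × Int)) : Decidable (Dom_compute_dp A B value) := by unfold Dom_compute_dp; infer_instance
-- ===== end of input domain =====

-- B replaces A's bottom-up nested-loop tabulation with top-down memoized recursion
-- over subproblems (a dict cache, cells forced on demand); objective: alternative.

-- ===== PORT A =====
-- A[i-1] used as a dict key: the one-character Python string of that character
def pvCharStr (oc : Option Char) : String :=
  match oc with
  | some c => String.ofList [c]
  | none => ""

-- body of A's inner 'for j in range(1, m+1)' loop (dp[i][j] = …)
def pvInnerA (A : String) (B : String) (value : List (String × Int)) (i : Int)
    (dp : List (List Int)) (j : Int) : List (List Int) :=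
  let newv : Int :=
    if PySem.Str.pyGet? A (i - 1) = PySem.Str.pyGet? B (j - 1) then
      max (max (PySem.List.pyGetD (PySem.List.pyGetD dp (i - 1) []) j 0)
               (PySem.List.pyGetD (PySem.List.pyGetD dp i []) (j - 1) 0))
          (PySem.List.pyGetD (PySem.List.pyGetD dp (i - 1) []) (j - 1) 0
            + (PySem.Dict.ofList value).getD (pvCharStr (PySem.Str.pyGet? A (i - 1))) 0)
    else
      max (PySem.List.pyGetD (PySem.List.pyGetD dp (i - 1) []) j 0)
          (PySem.List.pyGetD (PySem.List.pyGetD dp i []) (j - 1) 0)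
  PySem.List.pySetD dp i (PySem.List.pySetD (PySem.List.pyGetD dp i []) j newv)

-- body of A's outer 'for i in range(1, n+1)' loop
def pvOuterA (A : String) (B : String) (value : List (String × Int))
    (dp : List (List Int)) (i : Int) : List (List Int) :=
  (PySem.List.pyRange 1 (PySem.Str.len B + 1) 1).foldl (pvInnerA A B value i) dp

def compute_dp (A : String) (B : String) (value : List (String × Int)) : List (List Int) :=
  let n : Int := PySem.Str.len A
  let m : Int := PySem.Str.len B
  -- [[0]*(m+1) for _ in range(n+1)]  (list repetition ported as a range comprehension; exact)
  let dp0 : List (List Int) :=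
    (PySem.List.pyRange 0 (n + 1) 1).map
      (fun _ => (PySem.List.pyRange 0 (m + 1) 1).map (fun _ => (0 : Int)))
  (PySem.List.pyRange 1 (n + 1) 1).foldl (pvOuterA A B value) dp0

-- ===== PORT B =====
-- Source B's recursive helper 'lcs(i, j)' with the memo dict threaded as explicit state;
-- Python's tuple keys (i, j) are Nat × Nat (lcs is only reached with 0 ≤ i ≤ n, 0 ≤ j ≤ m).
def pvLcsB (as_ bs : List Char) (value : List (String × Int)) :
    Nat → Nat → PySem.Dict (Nat × Nat) Int → Int × PySem.Dict (Nat × Nat) Int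
  | i, j, memo =>
    match memo.get? (i, j) with
    | some v => (v, memo)                     -- if (i, j) in memo: return memo[(i, j)]
    | none =>
      match i, j with
      | 0, j' => ((0 : Int), PySem.Dict.insert memo (0, j') 0)        -- i == 0: r = 0
      | i' + 1, 0 => ((0 : Int), PySem.Dict.insert memo (i' + 1, 0) 0) -- j == 0: r = 0
      | i' + 1, j' + 1 =>
        let p1 := pvLcsB as_ bs value i' (j' + 1) memo            -- lcs(i-1, j)
        let p2 := pvLcsB as_ bs value (i' + 1) j' p1.2            -- lcs(i, j-1)
        let r0 := max p1.1 p2.1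
        let p3 :=
          match as_[i']?, bs[j']? with                            -- A[i-1] == B[j-1]
          | some a, some b =>
            if a = b then
              let q := pvLcsB as_ bs value i' j' p2.2             -- lcs(i-1, j-1)
              (max r0 (q.1 + (PySem.Dict.ofList value).getD (String.ofList [a]) 0), q.2)
            else (r0, p2.2)
          | _, _ => (r0, p2.2)
        (p3.1, PySem.Dict.insert p3.2 (i' + 1, j' + 1) p3.1)      -- memo[(i, j)] = r
  termination_by i j _ => (i, j)

-- Source B's inner comprehension '[lcs(i, j) for j in range(m+1)]', memo threaded
def pvRowB (as_ bs : List Char) (value : List (String × Int)) (i : Nat)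
    (st : List Int × PySem.Dict (Nat × Nat) Int) (j : Nat) :
    List Int × PySem.Dict (Nat × Nat) Int :=
  let q := pvLcsB as_ bs value i j st.2
  (st.1 ++ [q.1], q.2)

-- Source B's outer comprehension over 'i in range(n+1)'
def pvRowsB (as_ bs : List Char) (value : List (String × Int))
    (st : List (List Int) × PySem.Dict (Nat × Nat) Int) (i : Nat) :
    List (List Int) × PySem.Dict (Nat × Nat) Int :=
  let inner := (List.range (bs.length + 1)).foldl (pvRowB as_ bs value i) ([], st.2)
  (st.1 ++ [inner.1], inner.2)

def compute_dp_alt (A : String) (B : String) (value : List (String × Int)) : List (List Int) :=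
  -- range(n+1)/range(m+1) over the nonnegative lengths ported as List.range (exact)
  ((List.range (A.toList.length + 1)).foldl
    (pvRowsB A.toList B.toList value) ([], PySem.Dict.empty)).1

-- ===== PRECONDITION & SPEC =====
-- Pre_ excludes exactly the inputs where Python A raises KeyError: a character occurring
-- in both A and B whose one-character string is missing from `value`.
def Pre_compute_dp (A : String) (B : String) (value : List (String × Int)) : Prop :=
  (A.toList.all (fun c =>
    !(B.toList.contains c) || (PySem.Dict.ofList value).contains (String.ofList [c]))) = true
instance (A : String) (B : String) (value : List (String × Int)) : Decidable (Pre_compute_dp A B value) := by unfold Pre_compute_dp; infer_instance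

def pvWitness_compute_dp : String × String × (List (String × Int)) :=
  ("ab", "bc", [("b", 3)])

def Spec_compute_dp (A : String) (B : String) (value : List (String × Int)) (out : List (List Int)) : Prop := out = compute_dp_alt A B value
instance (A : String) (B : String) (value : List (String × Int)) (out : List (List Int)) : Decidable (Spec_compute_dp A B value out) := by unfold Spec_compute_dp; infer_instance

-- ===== CLAIM (what is proved, stated in full; the proofs are below) =====
def Claim_equal_compute_dp : Prop := ∀ (A : String) (B : String) (value : List (String × Int)), Dom_compute_dp A B value → Pre_compute_dp A B value → Spec_compute_dp A B value (compute_dp A B value)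

-- ===== LEMMAS AND PROOFS =====

-- value of a character under the `value` dict (0 for a missing key; unreachable under Pre_)
def pvVal (value : List (String × Int)) (c : Char) : Int :=
  (PySem.Dict.ofList value).getD (String.ofList [c]) 0

-- the mathematical DP recurrence both programs compute
def pvF (as bs : List Char) (val : Char → Int) : Nat → Nat → Int
  | 0, _ => 0
  | _ + 1, 0 => 0
  | i + 1, j + 1 =>
    let u := pvF as bs val i (j + 1)
    let l := pvF as bs val (i + 1) j
    match as[i]?, bs[j]? with
    | some a, some b =>
      if a = b then max (max u l) (pvF as bs val i j + val a) else max u l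
    | _, _ => max u l
  termination_by i j => (i, j)

def pvRowF (value : List (String × Int)) (as bs : List Char) (i : Nat) : List Int :=
  (List.range (bs.length + 1)).map (fun j => pvF as bs (pvVal value) i j)

lemma pvF_zero (as bs : List Char) (val : Char → Int) (j : Nat) :
    pvF as bs val 0 j = 0 := by
  cases j <;> simp [pvF]

lemma pvF_zero_right (as bs : List Char) (val : Char → Int) (i : Nat) :
    pvF as bs val i 0 = 0 := by
  cases i <;> simp [pvF]

lemma pvF_succ (as bs : List Char) (val : Char → Int) (i j : Nat)
    (a b : Char) (ha : as[i]? = some a) (hb : bs[j]? = some b) :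
    pvF as bs val (i + 1) (j + 1) =
      if a = b then
        max (max (pvF as bs val i (j + 1)) (pvF as bs val (i + 1) j))
            (pvF as bs val i j + val a)
      else max (pvF as bs val i (j + 1)) (pvF as bs val (i + 1) j) := by
  rw [pvF, ha, hb]

lemma pvRowF_zero (value : List (String × Int)) (as bs : List Char) :
    pvRowF value as bs 0 = List.replicate (bs.length + 1) 0 := by
  rw [pvRowF, List.eq_replicate_iff]
  refine ⟨by simp, ?_⟩
  intro b hb
  simp only [List.mem_map] at hb
  obtain ⟨j, _, hj⟩ := hb
  rw [← hj, pvF_zero]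

-- ===== B-side lemmas: the memo invariant =====

-- every cached entry is the true DP value
def pvGoodMemo (as bs : List Char) (value : List (String × Int))
    (memo : PySem.Dict (Nat × Nat) Int) : Prop :=
  ∀ p v, memo.get? p = some v → v = pvF as bs (pvVal value) p.1 p.2

lemma pvGoodMemo_empty (as bs : List Char) (value : List (String × Int)) :
    pvGoodMemo as bs value PySem.Dict.empty := by
  intro p v h
  rw [PySem.Dict.get?_empty] at h
  exact absurd h (by simp)

lemma pvGoodMemo_insert (as bs : List Char) (value : List (String × Int))
    (memo : PySem.Dict (Nat × Nat) Int) (i j : Nat) (v : Int)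
    (hg : pvGoodMemo as bs value memo) (hv : v = pvF as bs (pvVal value) i j) :
    pvGoodMemo as bs value (PySem.Dict.insert memo (i, j) v) := by
  intro p w h
  rw [PySem.Dict.get?_insert] at h
  by_cases hp : p = (i, j)
  · rw [if_pos hp] at h
    cases h
    rw [hp, hv]
  · rw [if_neg hp] at h
    exact hg p w h

lemma pvLcsB_spec (as bs : List Char) (value : List (String × Int)) :
    ∀ (N i j : Nat) (memo : PySem.Dict (Nat × Nat) Int),
      i + j ≤ N → i ≤ as.length → j ≤ bs.length → pvGoodMemo as bs value memo →
      (pvLcsB as bs value i j memo).1 = pvF as bs (pvVal value) i j ∧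
      pvGoodMemo as bs value (pvLcsB as bs value i j memo).2 := by
  intro N
  induction N with
  | zero =>
    intro i j memo hN _ _ hg
    have hi : i = 0 := by omega
    have hj : j = 0 := by omega
    subst hi hj
    cases h : memo.get? (0, 0) with
    | some v =>
      rw [pvLcsB.eq_def]; simp only [h]
      exact ⟨hg (0, 0) v h, hg⟩
    | none =>
      rw [pvLcsB.eq_def]; simp only [h]
      refine ⟨(pvF_zero as bs _ 0).symm, ?_⟩
      exact pvGoodMemo_insert as bs value memo 0 0 0 hg (pvF_zero as bs _ 0).symm
  | succ M ih =>
    intro i j memo hN hi hj hg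
    cases h : memo.get? (i, j) with
    | some v =>
      rw [pvLcsB.eq_def]; simp only [h]
      exact ⟨hg (i, j) v h, hg⟩
    | none =>
      match i, j with
      | 0, j =>
        rw [pvLcsB.eq_def]; simp only [h]
        refine ⟨(pvF_zero as bs _ j).symm, ?_⟩
        exact pvGoodMemo_insert as bs value memo 0 j 0 hg (pvF_zero as bs _ j).symm
      | i + 1, 0 =>
        rw [pvLcsB.eq_def]; simp only [h]
        refine ⟨(pvF_zero_right as bs _ (i + 1)).symm, ?_⟩
        exact pvGoodMemo_insert as bs value memo (i + 1) 0 0 hg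
          (pvF_zero_right as bs _ (i + 1)).symm
      | i + 1, j + 1 =>
        have h1 := ih i (j + 1) memo (by omega) (by omega) hj hg
        have h2 := ih (i + 1) j (pvLcsB as bs value i (j + 1) memo).2
          (by omega) hi (by omega) h1.2
        have hilt : i < as.length := by omega
        have hjlt : j < bs.length := by omega
        have ha : as[i]? = some as[i] := List.getElem?_eq_getElem hilt
        have hb : bs[j]? = some bs[j] := List.getElem?_eq_getElem hjlt
        rw [pvLcsB.eq_def]; simp only [h]
        simp only [ha, hb]
        by_cases hab : as[i] = bs[j]
        · simp only [if_pos hab]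
          have h3 := ih i j (pvLcsB as bs value (i + 1) j (pvLcsB as bs value i (j + 1) memo).2).2
            (by omega) (by omega) (by omega) h2.2
          have hr : max (max (pvLcsB as bs value i (j + 1) memo).1
                (pvLcsB as bs value (i + 1) j (pvLcsB as bs value i (j + 1) memo).2).1)
              ((pvLcsB as bs value i j
                  (pvLcsB as bs value (i + 1) j (pvLcsB as bs value i (j + 1) memo).2).2).1
                + (PySem.Dict.ofList value).getD (String.ofList [as[i]]) 0)
              = pvF as bs (pvVal value) (i + 1) (j + 1) := by
            rw [h1.1, h2.1, h3.1,
              pvF_succ as bs (pvVal value) i j as[i] bs[j] ha hb, if_pos hab]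
            rfl
          exact ⟨hr, pvGoodMemo_insert as bs value _ (i + 1) (j + 1) _ h3.2 hr⟩
        · simp only [if_neg hab]
          have hr : max (pvLcsB as bs value i (j + 1) memo).1
                (pvLcsB as bs value (i + 1) j (pvLcsB as bs value i (j + 1) memo).2).1
              = pvF as bs (pvVal value) (i + 1) (j + 1) := by
            rw [h1.1, h2.1,
              pvF_succ as bs (pvVal value) i j as[i] bs[j] ha hb, if_neg hab]
          exact ⟨hr, pvGoodMemo_insert as bs value _ (i + 1) (j + 1) _ h2.2 hr⟩

lemma pvRowB_fold (as bs : List Char) (value : List (String × Int)) (i : Nat)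
    (hi : i ≤ as.length) :
    ∀ (L : List Nat), (∀ j ∈ L, j ≤ bs.length) →
      ∀ (acc : List Int) (memo : PySem.Dict (Nat × Nat) Int), pvGoodMemo as bs value memo →
      (L.foldl (pvRowB as bs value i) (acc, memo)).1
        = acc ++ L.map (fun j => pvF as bs (pvVal value) i j) ∧
      pvGoodMemo as bs value (L.foldl (pvRowB as bs value i) (acc, memo)).2 := by
  intro L
  induction L with
  | nil => intro _ acc memo hg; simpa using hg
  | cons j L ihL =>
    intro hL acc memo hg
    have hj : j ≤ bs.length := hL j (List.mem_cons_self ..)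
    have hq := pvLcsB_spec as bs value (i + j) i j memo (le_refl _) hi hj hg
    rw [List.foldl_cons]
    have hstep : pvRowB as bs value i (acc, memo) j
        = (acc ++ [pvF as bs (pvVal value) i j], (pvLcsB as bs value i j memo).2) := by
      rw [pvRowB, hq.1]
    rw [hstep]
    have := ihL (fun x hx => hL x (List.mem_cons_of_mem _ hx))
      (acc ++ [pvF as bs (pvVal value) i j]) _ hq.2
    rw [this.1]
    exact ⟨by simp, this.2⟩

lemma pvRowsB_fold (as bs : List Char) (value : List (String × Int)) :
    ∀ (L : List Nat), (∀ i ∈ L, i ≤ as.length) →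
      ∀ (acc : List (List Int)) (memo : PySem.Dict (Nat × Nat) Int),
      pvGoodMemo as bs value memo →
      (L.foldl (pvRowsB as bs value) (acc, memo)).1
        = acc ++ L.map (fun i => pvRowF value as bs i) ∧
      pvGoodMemo as bs value (L.foldl (pvRowsB as bs value) (acc, memo)).2 := by
  intro L
  induction L with
  | nil => intro _ acc memo hg; simpa using hg
  | cons i L ihL =>
    intro hL acc memo hg
    have hi : i ≤ as.length := hL i (List.mem_cons_self ..)
    have hrow := pvRowB_fold as bs value i hi (List.range (bs.length + 1))
      (fun j hj => by simp at hj; omega) [] memo hg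
    rw [List.foldl_cons]
    have hstep : pvRowsB as bs value (acc, memo) i
        = (acc ++ [pvRowF value as bs i],
           ((List.range (bs.length + 1)).foldl (pvRowB as bs value i) ([], memo)).2) := by
      rw [pvRowsB]
      simp only
      rw [hrow.1]
      rw [pvRowF]
      simp
    rw [hstep]
    have := ihL (fun x hx => hL x (List.mem_cons_of_mem _ hx))
      (acc ++ [pvRowF value as bs i]) _ hrow.2
    rw [this.1]
    exact ⟨by simp, this.2⟩

lemma pvAlt_eq (A B : String) (value : List (String × Int)) :
    compute_dp_alt A B value
      = (List.range (A.toList.length + 1)).map (fun i => pvRowF value A.toList B.toList i) := by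
  have h := pvRowsB_fold A.toList B.toList value (List.range (A.toList.length + 1))
    (fun i hi => by simp only [List.mem_range] at hi; omega) [] PySem.Dict.empty
    (pvGoodMemo_empty A.toList B.toList value)
  rw [compute_dp_alt, h.1]
  simp

-- ===== A-side lemmas =====

lemma pvA_inner (A B : String) (value : List (String × Int)) (as bs : List Char)
    (hA : as = A.toList) (hB : bs = B.toList) (a : Char) (i : Nat)
    (ha : as[i]? = some a) :
    ∀ (k j : Nat), j + k = bs.length → ∀ (S : List (List Int)),
      (PySem.List.pyRange (1 + (j : Int)) ((bs.length : Int) + 1) 1).foldl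
        (pvInnerA A B value (1 + (i : Int)))
        ((List.range (i + 1)).map (fun t => pvRowF value as bs t) ++
          ((List.range (j + 1)).map (fun t => pvF as bs (pvVal value) (i + 1) t) ++
            List.replicate (bs.length - j) 0) :: S)
      = (List.range (i + 1)).map (fun t => pvRowF value as bs t) ++
          pvRowF value as bs (i + 1) :: S := by
  intro k
  induction k with
  | zero =>
    intro j hj S
    have hj' : j = bs.length := by omega
    subst hj'
    rw [PySem.List.pyRange_one_eq_nil (by omega), List.foldl_nil]
    simp [pvRowF]
  | succ k ih =>
    intro j hj S
    have hjlt : j < bs.length := by omega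
    rw [PySem.List.pyRange_one_cons (by omega), List.foldl_cons]
    have hstep : pvInnerA A B value (1 + (i : Int))
        ((List.range (i + 1)).map (fun t => pvRowF value as bs t) ++
          ((List.range (j + 1)).map (fun t => pvF as bs (pvVal value) (i + 1) t) ++
            List.replicate (bs.length - j) 0) :: S) (1 + (j : Int))
        = (List.range (i + 1)).map (fun t => pvRowF value as bs t) ++
          ((List.range (j + 1 + 1)).map (fun t => pvF as bs (pvVal value) (i + 1) t) ++
            List.replicate (bs.length - (j + 1)) 0) :: S := by
      have ei1 : (1 : Int) + (i : Int) - 1 = ((i : Nat) : Int) := by ring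
      have ej1 : (1 : Int) + (j : Int) - 1 = ((j : Nat) : Int) := by ring
      have ei2 : (1 : Int) + (i : Int) = ((i + 1 : Nat) : Int) := by push_cast; ring
      have ej2 : (1 : Int) + (j : Int) = ((j + 1 : Nat) : Int) := by push_cast; ring
      have hprefl : ((List.range (i + 1)).map (fun t => pvRowF value as bs t)).length = i + 1 := by
        simp
      have hga : PySem.List.pyGetD
          ((List.range (i + 1)).map (fun t => pvRowF value as bs t) ++
            ((List.range (j + 1)).map (fun t => pvF as bs (pvVal value) (i + 1) t) ++
              List.replicate (bs.length - j) 0) :: S) (1 + (i : Int) - 1) []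
          = pvRowF value as bs i := by
        rw [ei1, PySem.List.pyGetD_natCast,
          List.getD_append _ _ _ _ (by rw [hprefl]; omega),
          PySem.List.getD_map_range _ _ _ _ (by omega)]
      have hgb : PySem.List.pyGetD
          ((List.range (i + 1)).map (fun t => pvRowF value as bs t) ++
            ((List.range (j + 1)).map (fun t => pvF as bs (pvVal value) (i + 1) t) ++
              List.replicate (bs.length - j) 0) :: S) (1 + (i : Int)) []
          = (List.range (j + 1)).map (fun t => pvF as bs (pvVal value) (i + 1) t) ++
              List.replicate (bs.length - j) 0 := by
        rw [ei2, PySem.List.pyGetD_natCast, List.getD_eq_getElem?_getD,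
          List.getElem?_append_right (by rw [hprefl])]
        rw [hprefl]
        simp
      have hca : PySem.Str.pyGet? A (1 + (i : Int) - 1) = some a := by
        rw [ei1, PySem.Str.pyGet?_eq, PySem.Chars.pyGet?_eq_listPyGet?,
          PySem.List.pyGet?_natCast, ← hA]
        exact ha
      have hcb : PySem.Str.pyGet? B (1 + (j : Int) - 1) = some bs[j] := by
        rw [ej1, PySem.Str.pyGet?_eq, PySem.Chars.pyGet?_eq_listPyGet?,
          PySem.List.pyGet?_natCast, ← hB]
        exact List.getElem?_eq_getElem hjlt
      have hu : PySem.List.pyGetD (pvRowF value as bs i) (1 + (j : Int)) 0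
          = pvF as bs (pvVal value) i (j + 1) := by
        rw [ej2, PySem.List.pyGetD_natCast, pvRowF,
          PySem.List.getD_map_range _ _ _ _ (by omega)]
      have hl : PySem.List.pyGetD
          ((List.range (j + 1)).map (fun t => pvF as bs (pvVal value) (i + 1) t) ++
            List.replicate (bs.length - j) 0) (1 + (j : Int) - 1) 0
          = pvF as bs (pvVal value) (i + 1) j := by
        rw [ej1, PySem.List.pyGetD_natCast,
          List.getD_append _ _ _ _ (by simp),
          PySem.List.getD_map_range _ _ _ _ (by omega)]
      have hd : PySem.List.pyGetD (pvRowF value as bs i) (1 + (j : Int) - 1) 0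
          = pvF as bs (pvVal value) i j := by
        rw [ej1, PySem.List.pyGetD_natCast, pvRowF,
          PySem.List.getD_map_range _ _ _ _ (by omega)]
      have hv : (PySem.Dict.ofList value).getD (pvCharStr (some a)) 0 = pvVal value a := rfl
      simp only [pvInnerA, hga, hgb, hca, hcb, hu, hl, hd, hv, Option.some.injEq]
      rw [← pvF_succ as bs (pvVal value) i j a bs[j] ha (List.getElem?_eq_getElem hjlt)]
      rw [ei2, ej2, PySem.List.pySetD_natCast, PySem.List.pySetD_natCast]
      have hrow' : ((List.range (j + 1)).map (fun t => pvF as bs (pvVal value) (i + 1) t) ++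
            List.replicate (bs.length - j) 0).set (j + 1) (pvF as bs (pvVal value) (i + 1) (j + 1))
          = (List.range (j + 1 + 1)).map (fun t => pvF as bs (pvVal value) (i + 1) t) ++
            List.replicate (bs.length - (j + 1)) 0 := by
        rw [List.set_append]
        rw [if_neg (by simp)]
        rw [show bs.length - j = (bs.length - (j + 1)) + 1 from by omega, List.replicate_succ]
        simp only [List.length_map, List.length_range, Nat.sub_self, List.set_cons_zero]
        rw [List.range_succ (n := j + 1), List.map_append, List.append_assoc]
        rfl
      rw [hrow']
      rw [List.set_append]
      rw [if_neg (by rw [hprefl]; omega), hprefl, Nat.sub_self, List.set_cons_zero]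
    rw [hstep]
    have ecast : (1 : Int) + (j : Int) + 1 = 1 + ((j + 1 : Nat) : Int) := by push_cast; ring
    rw [ecast]
    exact ih (j + 1) (by omega) S

lemma pvA_outer (A B : String) (value : List (String × Int)) (as bs : List Char)
    (hA : as = A.toList) (hB : bs = B.toList) :
    ∀ (k i : Nat), i + k = as.length →
      (PySem.List.pyRange (1 + (i : Int)) ((as.length : Int) + 1) 1).foldl
        (pvOuterA A B value)
        ((List.range (i + 1)).map (fun t => pvRowF value as bs t) ++
          List.replicate (as.length - i) (List.replicate (bs.length + 1) 0))
      = (List.range (as.length + 1)).map (fun t => pvRowF value as bs t) := by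
  intro k
  induction k with
  | zero =>
    intro i hi
    have hi' : i = as.length := by omega
    subst hi'
    rw [PySem.List.pyRange_one_eq_nil (by omega), List.foldl_nil]
    simp
  | succ k ih =>
    intro i hi
    have hilt : i < as.length := by omega
    rw [PySem.List.pyRange_one_cons (by omega), List.foldl_cons]
    have ha : as[i]? = some as[i] := List.getElem?_eq_getElem hilt
    have hz : (List.range (0 + 1)).map (fun t => pvF as bs (pvVal value) (i + 1) t) ++
        List.replicate (bs.length - 0) 0 = List.replicate (bs.length + 1) 0 := by
      simp [pvF_zero_right, List.replicate_succ]
    have hrep : List.replicate (as.length - i) (List.replicate (bs.length + 1) (0 : Int))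
        = List.replicate (bs.length + 1) 0 ::
          List.replicate (as.length - (i + 1)) (List.replicate (bs.length + 1) 0) := by
      rw [show as.length - i = (as.length - (i + 1)) + 1 from by omega, List.replicate_succ]
    have hstep : pvOuterA A B value
        ((List.range (i + 1)).map (fun t => pvRowF value as bs t) ++
          List.replicate (as.length - i) (List.replicate (bs.length + 1) 0)) (1 + (i : Int))
        = (List.range (i + 1)).map (fun t => pvRowF value as bs t) ++
          pvRowF value as bs (i + 1) ::
            List.replicate (as.length - (i + 1)) (List.replicate (bs.length + 1) 0) := by
      have hlen : PySem.Str.len B + 1 = ((bs.length : Int) + 1) := by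
        rw [PySem.Str.len_eq, hB]
      have h1 : (1 : Int) = 1 + ((0 : Nat) : Int) := by norm_num
      rw [pvOuterA, hlen, hrep, ← hz, h1]
      exact pvA_inner A B value as bs hA hB as[i] i ha bs.length 0 (by omega) _
    rw [hstep]
    have hpref : (List.range (i + 1)).map (fun t => pvRowF value as bs t) ++
        pvRowF value as bs (i + 1) ::
          List.replicate (as.length - (i + 1)) (List.replicate (bs.length + 1) 0)
        = (List.range (i + 1 + 1)).map (fun t => pvRowF value as bs t) ++
          List.replicate (as.length - (i + 1)) (List.replicate (bs.length + 1) 0) := by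
      rw [List.range_succ (n := i + 1), List.map_append, List.append_assoc]
      rfl
    rw [hpref]
    have ecast : (1 : Int) + (i : Int) + 1 = 1 + ((i + 1 : Nat) : Int) := by push_cast; ring
    rw [ecast]
    exact ih (i + 1) (by omega)

lemma pvA_eq (A B : String) (value : List (String × Int)) :
    compute_dp A B value
      = (List.range (A.toList.length + 1)).map (fun i => pvRowF value A.toList B.toList i) := by
  have hdp0 : ((PySem.List.pyRange 0 (PySem.Str.len A + 1) 1).map
      (fun _ => (PySem.List.pyRange 0 (PySem.Str.len B + 1) 1).map (fun _ => (0 : Int))))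
      = List.replicate (A.toList.length + 1) (List.replicate (B.toList.length + 1) 0) := by
    rw [List.map_const']
    have hin : ((PySem.List.pyRange 0 (PySem.Str.len B + 1) 1).map (fun _ => (0 : Int)))
        = List.replicate (B.toList.length + 1) 0 := by
      rw [List.map_const']
      congr 1
      rw [PySem.List.length_pyRange_one]
      simp
    rw [hin]
    congr 1
    rw [PySem.List.length_pyRange_one]
    simp
  have hsplit : List.replicate (A.toList.length + 1) (List.replicate (B.toList.length + 1) (0 : Int))
      = (List.range (0 + 1)).map (fun t => pvRowF value A.toList B.toList t) ++
        List.replicate (A.toList.length - 0) (List.replicate (B.toList.length + 1) 0) := by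
    rw [List.replicate_succ]
    simp [pvRowF_zero]
  have h2 : PySem.List.pyRange 1 (PySem.Str.len A + 1) 1
      = PySem.List.pyRange (1 + ((0 : Nat) : Int)) ((A.toList.length : Int) + 1) 1 := by
    rw [PySem.Str.len_eq]
    norm_num
  show (PySem.List.pyRange 1 (PySem.Str.len A + 1) 1).foldl (pvOuterA A B value) _ = _
  rw [hdp0, hsplit, h2]
  exact pvA_outer A B value A.toList B.toList rfl rfl A.toList.length 0 (by omega)

-- ===== VERDICT (by name: the statement is the Claim_ definition above) =====
theorem compute_dp_spec : Claim_equal_compute_dp := by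
  intro A B value _ _
  unfold Spec_compute_dp
  rw [pvA_eq, pvAlt_eq]
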